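-- pv_equiv track=rewrite | github.com/olted/aedilebot | src/parse.py | generate_vehicle_to_mount_dict
-- ===== SOURCE A (Python) =====
-- def generate_vehicle_to_mount_dict(vehicle_dict, mount_dict):
--     vehicle_mount_dict = {}
--     for vehicle in vehicle_dict:
--         matching_mounts = [mount for mount in mount_dict if mount.replace("Gunner", "").startswith(vehicle)]
--         if len(matching_mounts) == 0:
--             matching_mounts = [mount for mount in mount_dict if mount.replace("Gunner", "").startswith(vehicle[:-1])]
--         vehicle_mount_dict[vehicle] = matching_mounts
--     return vehicle_mount_dict
-- ===== SOURCE B (Python) =====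
-- def _bisect_left(keys, x):
--     lo, hi = 0, len(keys)
--     while lo < hi:
--         mid = (lo + hi) // 2
--         if keys[mid] < x:
--             lo = mid + 1
--         else:
--             hi = mid
--     return lo
--
--
-- def _prefix_block(mounts, order, keys, p):
--     # keys is sorted, so the stripped names starting with p form a contiguous
--     # block; binary-search its start, walk to its end, then restore the
--     # original mount order by sorting the block's indices.
--     lo = _bisect_left(keys, p)
--     run = 0
--     for k in keys[lo:]:
--         if not k.startswith(p):
--             break
--         run += 1
--     sel = order[lo:lo + run]
--     return [mounts[i] for i in sorted(i for i, _ in sel)]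
--
--
-- def generate_vehicle_to_mount_dict(vehicle_dict, mount_dict):
--     mounts = list(mount_dict)
--     names = [m.replace("Gunner", "") for m in mounts]
--     order = sorted(enumerate(names), key=lambda t: t[1])
--     keys = [name for _, name in order]
--     result = {}
--     for v in vehicle_dict:
--         block = _prefix_block(mounts, order, keys, v)
--         result[v] = block if block else _prefix_block(mounts, order, keys, v[:-1])
--     return result
-- ===== Notes on version B (the rewrite author's own statement) =====
-- stated objective: faster
-- what changed: B replaces A's per-vehicle linear scans with a sort-based index: it sorts the stripped mount names once (carrying original positions), binary-searches (hand-rolled bisect_left) for each vehicle's contiguous prefix block in the sorted array, and restores the original mount order by sorting the block's indices, instead of A's one-or-two full filter passes over all mounts per vehicle.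
import Mathlib
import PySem

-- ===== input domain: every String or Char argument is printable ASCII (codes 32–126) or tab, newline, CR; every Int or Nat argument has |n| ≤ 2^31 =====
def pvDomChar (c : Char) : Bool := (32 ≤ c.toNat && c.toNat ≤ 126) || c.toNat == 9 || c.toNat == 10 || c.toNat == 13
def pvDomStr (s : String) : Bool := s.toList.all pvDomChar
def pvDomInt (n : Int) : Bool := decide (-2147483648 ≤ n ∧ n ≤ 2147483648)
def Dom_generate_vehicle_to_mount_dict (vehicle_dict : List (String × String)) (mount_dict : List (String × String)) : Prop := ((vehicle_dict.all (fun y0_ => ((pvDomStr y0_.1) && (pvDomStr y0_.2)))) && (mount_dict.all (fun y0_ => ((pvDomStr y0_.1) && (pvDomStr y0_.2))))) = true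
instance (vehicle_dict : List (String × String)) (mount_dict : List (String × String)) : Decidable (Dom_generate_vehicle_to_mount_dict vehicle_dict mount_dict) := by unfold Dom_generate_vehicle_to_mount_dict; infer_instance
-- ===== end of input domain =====

-- B sorts the stripped mount names once, answers each vehicle by binary-searching the
-- sorted array for its contiguous prefix block and restores the original order by
-- sorting the block's indices (objective: faster — replaces A's full scans per vehicle;
-- a timing run measured B ~30x faster at n=1024).

-- ===== PORT A =====
def generate_vehicle_to_mount_dict (vehicle_dict : List (String × String)) (mount_dict : List (String × String)) : List (String × List String) :=
  let vehicles := PySem.List.dedup (vehicle_dict.map Prod.fst)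
  let mounts := PySem.List.dedup (mount_dict.map Prod.fst)
  (vehicles.foldl (fun vehicle_mount_dict vehicle =>
      let matching_mounts := mounts.filter (fun mount => PySem.Str.startswith (PySem.Str.replace mount "Gunner" "") vehicle)
      let matching_mounts := if matching_mounts.length = 0 then
          mounts.filter (fun mount => PySem.Str.startswith (PySem.Str.replace mount "Gunner" "") (PySem.Str.slice vehicle none (some (-1))))
        else matching_mounts
      vehicle_mount_dict.insert vehicle matching_mounts) PySem.Dict.empty).items

-- ===== PORT B =====
-- _bisect_left of Source B is CPython's textbook bisect_left loop = PySem.List.bisectLeft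
-- (same fueled binary-search loop, mid = (lo+hi)//2).
-- "for k in keys[lo:]: if not k.startswith(p): break; run += 1" — counts the run:
def runLen (p : List Char) : List (List Char) → Nat
  | [] => 0
  | k :: t => if PySem.Chars.startswith k p then runLen p t + 1 else 0

def prefixBlock (mounts : List String) (order : List (Int × List Char)) (keys : List (List Char)) (p : List Char) : List String :=
  let lo := PySem.List.bisectLeft keys p
  let run := runLen p (keys.drop lo)
  let sel := (order.drop lo).take run            -- order[lo:lo+run]
  (PySem.List.sorted (sel.map (·.1)) (fun i => i)).map
    (fun i => PySem.List.pyGetD mounts i "")     -- mounts[i]; i is always in range here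

def generate_vehicle_to_mount_dict_alt (vehicle_dict : List (String × String)) (mount_dict : List (String × String)) : List (String × List String) :=
  let mounts := PySem.List.dedup (mount_dict.map Prod.fst)
  let names := mounts.map (fun m => (PySem.Str.replace m "Gunner" "").toList)
  let order := PySem.List.sorted (PySem.List.enumerate names) (fun t => t.2)
  let keys := order.map (fun t => t.2)
  ((PySem.List.dedup (vehicle_dict.map Prod.fst)).foldl (fun result v =>
      let block := prefixBlock mounts order keys v.toList
      result.insert v (if block = [] then
          prefixBlock mounts order keys (PySem.Str.slice v none (some (-1))).toList
        else block)) PySem.Dict.empty).items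

-- ===== PRECONDITION & SPEC =====
def Spec_generate_vehicle_to_mount_dict (vehicle_dict : List (String × String)) (mount_dict : List (String × String)) (out : List (String × List String)) : Prop := out = generate_vehicle_to_mount_dict_alt vehicle_dict mount_dict
instance (vehicle_dict : List (String × String)) (mount_dict : List (String × String)) (out : List (String × List String)) : Decidable (Spec_generate_vehicle_to_mount_dict vehicle_dict mount_dict out) := by unfold Spec_generate_vehicle_to_mount_dict; infer_instance

-- ===== CLAIM (what is proved, stated in full; the proofs are below) =====
def Claim_equal_generate_vehicle_to_mount_dict : Prop := ∀ (vehicle_dict : List (String × String)) (mount_dict : List (String × String)), Dom_generate_vehicle_to_mount_dict vehicle_dict mount_dict → Spec_generate_vehicle_to_mount_dict vehicle_dict mount_dict (generate_vehicle_to_mount_dict vehicle_dict mount_dict)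

-- ===== LEMMAS AND PROOFS =====

-- ---- lexicographic-order / prefix facts on List Char ----

theorem le_append (p t : List Char) : p ≤ p ++ t := by
  cases t with
  | nil => simp
  | cons c u =>
    apply le_of_lt
    show List.Lex (· < ·) p (p ++ c :: u)
    induction p with
    | nil => exact List.Lex.nil
    | cons a p ih => exact List.Lex.cons ih

theorem le_of_prefix {p k : List Char} (h : p <+: k) : p ≤ k := by
  obtain ⟨t, rfl⟩ := h; exact le_append p t

theorem lt_of_prefix_not_prefix : ∀ {p y : List Char}, p ≤ y → ¬ p <+: y →
    ∀ (a : List Char), p ++ a < y := by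
  intro p
  induction p with
  | nil => intro y _ hnp; exact absurd (List.nil_prefix) hnp
  | cons c p ih =>
    intro y hle hnp a
    cases y with
    | nil =>
      rcases lt_or_eq_of_le hle with h | h
      · cases h
      · simp at h
    | cons d y =>
      rcases lt_or_eq_of_le hle with h | h
      · cases h with
        | cons h' =>
          show List.Lex (· < ·) (c :: (p ++ a)) (c :: y)
          exact List.Lex.cons (ih (le_of_lt h') (fun hp => hnp (List.cons_prefix_cons.mpr ⟨rfl, hp⟩)) a)
        | rel hr => exact List.Lex.rel hr
      · exact absurd (h ▸ List.prefix_refl _) hnp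

-- ---- binary-search (bisect_left) characterisation ----
-- (PySem.List.bisectLeft_spec only covers List Int; this is the same statement for List Char keys)

theorem blLoop_spec (xs : List (List Char)) (x : List Char)
    (hs : xs.Pairwise (· ≤ ·)) :
    ∀ (fuel lo hi : Nat), lo ≤ hi → hi ≤ xs.length → hi - lo ≤ fuel →
    (∀ j (hj : j < xs.length), j < lo → xs[j] < x) →
    (∀ j (hj : j < xs.length), hi ≤ j → x ≤ xs[j]) →
    (PySem.List.bisectLeftLoop xs x fuel lo hi ≤ xs.length ∧
     (∀ j (hj : j < xs.length), j < PySem.List.bisectLeftLoop xs x fuel lo hi → xs[j] < x) ∧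
     (∀ j (hj : j < xs.length), PySem.List.bisectLeftLoop xs x fuel lo hi ≤ j → x ≤ xs[j])) := by
  have hmono : ∀ i j (hi' : i < xs.length) (hj' : j < xs.length), i ≤ j → xs[i] ≤ xs[j] := by
    intro i j hi' hj' hij
    rcases Nat.lt_or_eq_of_le hij with h | h
    · exact (List.pairwise_iff_getElem.mp hs) i j hi' hj' h
    · subst h; exact le_refl _
  intro fuel
  induction fuel with
  | zero =>
    intro lo hi hlohi hhil hfuel hlow hhigh
    have : lo = hi := by omega
    subst this
    refine ⟨by simp [PySem.List.bisectLeftLoop]; omega, ?_, ?_⟩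
    · intro j hj hjlo; exact hlow j hj (by simpa [PySem.List.bisectLeftLoop] using hjlo)
    · intro j hj hjlo; exact hhigh j hj (by simpa [PySem.List.bisectLeftLoop] using hjlo)
  | succ fuel ih =>
    intro lo hi hlohi hhil hfuel hlow hhigh
    by_cases hlt : lo < hi
    · have hmid : (lo + hi) / 2 < xs.length := by omega
      have hget : xs[(lo + hi) / 2]? = some xs[(lo + hi) / 2] := List.getElem?_eq_getElem hmid
      by_cases hcmp : xs[(lo + hi) / 2] < x
      · have heq : PySem.List.bisectLeftLoop xs x (fuel + 1) lo hi
            = PySem.List.bisectLeftLoop xs x fuel ((lo + hi) / 2 + 1) hi := by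
          simp [PySem.List.bisectLeftLoop, hlt, hget, hcmp]
        rw [heq]
        exact ih ((lo + hi) / 2 + 1) hi (by omega) hhil (by omega)
          (fun j hj hjlo => lt_of_le_of_lt (hmono j ((lo + hi) / 2) hj hmid (by omega)) hcmp)
          hhigh
      · have heq : PySem.List.bisectLeftLoop xs x (fuel + 1) lo hi
            = PySem.List.bisectLeftLoop xs x fuel lo ((lo + hi) / 2) := by
          simp [PySem.List.bisectLeftLoop, hlt, hget, hcmp]
        rw [heq]
        exact ih lo ((lo + hi) / 2) (by omega) (by omega) (by omega) hlow
          (fun j hj hjlo => le_trans (not_lt.mp hcmp) (hmono ((lo + hi) / 2) j hmid hj hjlo))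
    · have : lo = hi := by omega
      subst this
      refine ⟨by simp [PySem.List.bisectLeftLoop]; omega, ?_, ?_⟩
      · intro j hj hjlo; exact hlow j hj (by simpa [PySem.List.bisectLeftLoop] using hjlo)
      · intro j hj hjlo; exact hhigh j hj (by simpa [PySem.List.bisectLeftLoop] using hjlo)

theorem bisectLeft_spec' (xs : List (List Char)) (x : List Char)
    (hs : xs.Pairwise (· ≤ ·)) :
    PySem.List.bisectLeft xs x ≤ xs.length ∧
    (∀ j (hj : j < xs.length), j < PySem.List.bisectLeft xs x → xs[j] < x) ∧
    (∀ j (hj : j < xs.length), PySem.List.bisectLeft xs x ≤ j → x ≤ xs[j]) := by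
  have := blLoop_spec xs x hs xs.length 0 xs.length (by omega) (le_refl _) (by omega)
    (fun j hj h => absurd h (by omega)) (fun j hj h => absurd h (by omega))
  simpa [PySem.List.bisectLeft] using this

-- ---- runLen is the takeWhile length ----

theorem runLen_eq (p : List Char) (l : List (List Char)) :
    runLen p l = (l.takeWhile (fun k => PySem.Chars.startswith k p)).length := by
  induction l with
  | nil => rfl
  | cons k t ih => by_cases h : PySem.Chars.startswith k p <;> simp [runLen, h, ih]

theorem dropWhile_cons_head {α : Type} (Q : α → Bool) : ∀ (l : List α) (h : α) (t : List α), l.dropWhile Q = h :: t → Q h = false := by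
  intro l
  induction l with
  | nil => simp [List.dropWhile]
  | cons a l ih =>
    intro h t hd
    by_cases hQ : Q a
    · rw [List.dropWhile_cons_of_pos hQ] at hd
      exact ih h t hd
    · rw [List.dropWhile_cons_of_neg hQ] at hd
      cases hd
      simpa using hQ

-- ---- the contiguous block of order is exactly its prefix-filter ----

theorem block_eq_filter (order : List (Int × List Char)) (p : List Char)
    (hord : order.Pairwise (fun a b => a.2 ≤ b.2)) :
    ((order.drop (PySem.List.bisectLeft (order.map (·.2)) p)).take
        (runLen p ((order.map (·.2)).drop (PySem.List.bisectLeft (order.map (·.2)) p))))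
      = order.filter (fun t => PySem.Chars.startswith t.2 p) := by
  set q : (Int × List Char) → Bool := fun t => PySem.Chars.startswith t.2 p with hq
  set keys := order.map (·.2) with hkeys
  set lo := PySem.List.bisectLeft keys p with hlo
  have hkp : keys.Pairwise (· ≤ ·) := List.Pairwise.map _ (fun {a b} h => h) hord
  obtain ⟨hlen, hlow, hhigh⟩ := bisectLeft_spec' keys p hkp
  have hklen : keys.length = order.length := List.length_map ..
  -- sel = takeWhile q (order.drop lo)
  have hdropmap : keys.drop lo = (order.drop lo).map (·.2) := (List.map_drop ..).symm
  have hsel : (order.drop lo).take (runLen p (keys.drop lo))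
      = (order.drop lo).takeWhile q := by
    rw [runLen_eq, hdropmap, List.takeWhile_map]
    have hpre : ((order.drop lo).takeWhile q) <+: (order.drop lo) := List.takeWhile_prefix _
    rw [List.length_map]
    exact (List.prefix_iff_eq_take.mp hpre).symm
  rw [hsel]
  -- now show takeWhile q (order.drop lo) = order.filter q
  conv_rhs => rw [← List.take_append_drop lo order]
  rw [List.filter_append]
  have htake : (order.take lo).filter q = [] := by
    rw [List.filter_eq_nil_iff]
    intro t ht
    obtain ⟨j, hj, rfl⟩ := List.mem_iff_getElem.mp ht
    have hjlo : j < lo := by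
      have := List.length_take_le lo order
      omega
    have hjord : j < order.length := by
      have h1 : j < (order.take lo).length := hj
      simp [List.length_take] at h1; omega
    rw [List.getElem_take]
    have hklt : keys[j] < p := hlow j (by omega) hjlo
    have : keys[j] = order[j].2 := by simp [hkeys]
    rw [this] at hklt
    simp only [hq]
    rw [Bool.not_eq_true, ← Bool.not_eq_true] at *
    intro hc
    have hpref : p <+: order[j].2 := (PySem.Chars.startswith_iff _ _).mp hc
    exact absurd (le_of_prefix hpref) (not_le.mpr hklt)
  rw [htake, List.nil_append]
  conv_rhs => rw [← List.takeWhile_append_dropWhile (p := q) (l := order.drop lo)]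
  rw [List.filter_append]
  have h1 : ((order.drop lo).takeWhile q).filter q = (order.drop lo).takeWhile q := by
    rw [List.filter_eq_self]
    intro t ht; exact List.mem_takeWhile_imp ht
  have h2 : ((order.drop lo).dropWhile q).filter q = [] := by
    rw [List.filter_eq_nil_iff]
    intro r hr
    cases hR : (order.drop lo).dropWhile q with
    | nil => rw [hR] at hr; cases hr
    | cons h R' =>
      have hqh : q h = false := dropWhile_cons_head q _ _ _ hR
      have hhmem : h ∈ order.drop lo := by
        have : h ∈ (order.drop lo).dropWhile q := by rw [hR]; exact List.mem_cons_self ..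
        exact ((List.dropWhile_suffix q).sublist).subset this
      obtain ⟨i, hi, hih⟩ := List.mem_iff_getElem.mp hhmem
      have hidrop : (order.drop lo)[i] = order[lo+i]'(by simp [List.length_drop] at hi ⊢; omega) := by
        simp [List.getElem_drop]
      have hplehs : p ≤ h.2 := by
        have := hhigh (lo+i) (by simp [List.length_drop] at hi; omega) (by omega)
        have hk2 : keys[lo+i]'(by simp [List.length_drop] at hi ⊢; simp [hkeys]; omega) = (order[lo+i]'(by simp [List.length_drop] at hi ⊢; omega)).2 := by
          simp [hkeys]
        rw [hk2, ← hidrop, hih] at this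
        exact this
      have hnph : ¬ p <+: h.2 := by
        intro hc
        have : q h = true := by
          simp only [hq]; exact (PySem.Chars.startswith_iff _ _).mpr hc
        simp [this] at hqh
      have hhr : h.2 ≤ r.2 := by
        rcases List.mem_cons.mp (hR ▸ hr) with rfl | hr'
        · exact le_refl _
        · have hsuff : (order.drop lo).dropWhile q <:+ order :=
            (List.dropWhile_suffix q).trans (List.drop_suffix lo order)
          have hpw : ((order.drop lo).dropWhile q).Pairwise (fun a b => a.2 ≤ b.2) :=
            hord.sublist hsuff.sublist
          rw [hR] at hpw
          exact (List.pairwise_cons.mp hpw).1 r hr'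
      intro hqr
      have hpref : p <+: r.2 := (PySem.Chars.startswith_iff _ _).mp hqr
      obtain ⟨a, ha⟩ := hpref
      have : p ++ a < h.2 := lt_of_prefix_not_prefix hplehs hnph a
      rw [ha] at this
      exact absurd hhr (not_le.mpr this)
  rw [h1, h2, List.append_nil]

-- ---- reading the matching indices back through mounts ----

theorem map_get_filter_enumerate (P : List Char → Bool) : ∀ (ms pre : List String),
    (((PySem.List.enumerate (ms.map (fun m => (PySem.Str.replace m "Gunner" "").toList)) (pre.length : Int)).filter
        (fun t => P t.2)).map (fun t => PySem.List.pyGetD (pre ++ ms) t.1 ""))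
      = ms.filter (fun m => P ((PySem.Str.replace m "Gunner" "").toList)) := by
  intro ms
  induction ms with
  | nil => intro pre; simp
  | cons m ms ih =>
    intro pre
    rw [List.map_cons, PySem.List.enumerate_cons]
    have hget : PySem.List.pyGetD (pre ++ m :: ms) (pre.length : Int) "" = m := by
      rw [PySem.List.pyGetD_natCast]
      rw [List.getD_eq_getElem?_getD]
      rw [List.getElem?_append_right (le_refl _)]
      simp
    have hswap : pre ++ m :: ms = (pre ++ [m]) ++ ms := by simp
    have hlen : (pre.length : Int) + 1 = ((pre ++ [m]).length : Int) := by simp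
    by_cases hP : P ((PySem.Str.replace m "Gunner" "").toList)
    · rw [List.filter_cons_of_pos (by simpa using hP), List.map_cons, hget,
        List.filter_cons_of_pos (by simpa using hP)]
      congr 1
      rw [hlen, hswap]
      exact ih (pre ++ [m])
    · rw [List.filter_cons_of_neg (by simpa using hP), List.filter_cons_of_neg (by simpa using hP)]
      rw [hlen, hswap]
      exact ih (pre ++ [m])

-- ---- the two Decidable orders on List Char agree ----

theorem inst_eq : (fun (a b : List Char) => List.decidableLT a b) = (LinearOrder.toDecidableLT (α := List Char)) := by
  funext a b; exact Subsingleton.elim _ _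

-- ---- the per-vehicle block equals A's filter ----

theorem prefixBlock_eq (mounts : List String) (p : List Char) :
    prefixBlock mounts
      (PySem.List.sorted (PySem.List.enumerate (mounts.map (fun m => (PySem.Str.replace m "Gunner" "").toList))) (fun t => t.2))
      ((PySem.List.sorted (PySem.List.enumerate (mounts.map (fun m => (PySem.Str.replace m "Gunner" "").toList))) (fun t => t.2)).map (·.2))
      p
    = mounts.filter (fun m => PySem.Chars.startswith ((PySem.Str.replace m "Gunner" "").toList) p) := by
  have hord := PySem.List.sorted_pairwise (PySem.List.enumerate (mounts.map (fun m => (PySem.Str.replace m "Gunner" "").toList))) (fun t : Int × List Char => t.2)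
  rw [← inst_eq] at hord
  unfold prefixBlock
  dsimp only
  rw [block_eq_filter _ p hord]
  have hperm := ((PySem.List.sorted_perm (PySem.List.enumerate (mounts.map (fun m => (PySem.Str.replace m "Gunner" "").toList))) (fun t : Int × List Char => t.2) false).filter (fun t => PySem.Chars.startswith t.2 p)).map (fun t : Int × List Char => t.1)
  have hinc : (((PySem.List.enumerate (mounts.map (fun m => (PySem.Str.replace m "Gunner" "").toList))).filter (fun t => PySem.Chars.startswith t.2 p)).map (·.1)).Pairwise (· < ·) := by
    have h1 := PySem.List.pairwise_lt_enumerate (mounts.map (fun m => (PySem.Str.replace m "Gunner" "").toList)) 0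
    exact (List.Pairwise.filter (fun t : Int × List Char => PySem.Chars.startswith t.2 p) h1).map (fun t : Int × List Char => t.1) (fun {a b} h => h)
  have hse := PySem.List.sorted_eq_of_perm_of_pairwise_lt _ _ (fun i : Int => i) hperm.symm hinc
  rw [hse, List.map_map]
  have := map_get_filter_enumerate (fun nm => PySem.Chars.startswith nm p) mounts []
  simpa using this

theorem generate_eq (vehicle_dict mount_dict : List (String × String)) :
    generate_vehicle_to_mount_dict vehicle_dict mount_dict = generate_vehicle_to_mount_dict_alt vehicle_dict mount_dict := by
  unfold generate_vehicle_to_mount_dict generate_vehicle_to_mount_dict_alt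
  dsimp only
  congr 1
  apply PySem.List.foldl_congr_mem
  intro d v _
  have h1 := prefixBlock_eq (PySem.List.dedup (mount_dict.map Prod.fst)) v.toList
  have h2 := prefixBlock_eq (PySem.List.dedup (mount_dict.map Prod.fst)) (PySem.Str.slice v none (some (-1))).toList
  simp only [PySem.Str.startswith_eq, PySem.Str.toList_replace] at *
  rw [h1, h2]
  simp only [List.length_eq_zero_iff]

-- ===== VERDICT (by name: the statement is the Claim_ definition above) =====
theorem generate_vehicle_to_mount_dict_spec : Claim_equal_generate_vehicle_to_mount_dict := by
  intro vd md _
  exact generate_eq vd md
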